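-- pv_equiv track=rewrite | github.com/devchoplife/ms-interview-prep | Codility Online Assessment/digitsCount.py | smallestPos
-- ===== SOURCE A (Python) =====
-- def smallestPos(s, n):
--     ans = ""
--
--     arr = [0] * 10
--
--     for i in range(n):
--         arr[ord(s[i]) - 48] += 1
--
--     for i in range(10):
--         for j in range(arr[i]):
--             ans = ans + str(i)
--
--     return ans
-- ===== SOURCE B (Python) =====
-- def smallestPos(s, n):
--     # comparison sort of the first n characters (code-point order = ascending digits)
--     return ''.join(sorted(s[i] for i in range(n)))
-- ===== Notes on version B (the rewrite author's own statement) =====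
-- stated objective: idiomatic
-- what changed: Replaces the ten-bucket counting-sort table (count pass + rebuild pass) with a single comparison sort of the selected characters joined into a string.
-- intended difference: On inputs whose first n characters include a non-digit with code 38..47 ('&'..'/'), A's negative index ord(c)-48 wraps around the 10-slot table and A returns a spurious digit (e.g. '9' for '/'), while B returns the characters themselves sorted, which is the intended 'sort the characters' result. — e.g. on smallestPos("/", 1): A returns "9", B returns "/"
import Mathlib
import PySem

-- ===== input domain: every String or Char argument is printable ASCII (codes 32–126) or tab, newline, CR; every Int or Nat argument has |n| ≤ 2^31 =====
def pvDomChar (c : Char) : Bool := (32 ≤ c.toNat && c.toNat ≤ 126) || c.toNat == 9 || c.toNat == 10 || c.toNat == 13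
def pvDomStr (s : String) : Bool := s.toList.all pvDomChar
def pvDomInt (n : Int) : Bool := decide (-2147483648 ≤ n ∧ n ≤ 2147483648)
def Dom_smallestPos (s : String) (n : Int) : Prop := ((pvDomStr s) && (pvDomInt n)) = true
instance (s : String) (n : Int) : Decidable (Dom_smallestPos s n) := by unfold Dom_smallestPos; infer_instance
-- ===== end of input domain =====

-- B replaces A's counting-sort table with one comparison sort of the selected characters (idiomatic; not claimed faster).
-- Python str concatenation is tracked on List Char (exact: a Python str is its character sequence).

-- ===== PORT A =====
def smallestPos (s : String) (n : Int) : String :=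
  -- ans = ""; arr = [0] * 10
  let cs := s.toList
  let arr0 : List Int := List.replicate 10 0
  -- for i in range(n): arr[ord(s[i]) - 48] += 1   (Python list indexing incl. negative wrap: pySetD/pyGetD)
  let arr := (PySem.List.pyRange 0 n 1).foldl (fun arr i =>
      PySem.List.pySetD arr (((PySem.List.pyGetD cs i ' ').toNat : Int) - 48)
        (PySem.List.pyGetD arr (((PySem.List.pyGetD cs i ' ').toNat : Int) - 48) 0 + 1)) arr0
  -- for i in range(10): for j in range(arr[i]): ans = ans + str(i)
  let ans := (PySem.List.pyRange 0 10 1).foldl (fun ans i =>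
      (PySem.List.pyRange 0 (PySem.List.pyGetD arr i 0) 1).foldl
        (fun ans _ => ans ++ PySem.Int.toChars i) ans) ([] : List Char)
  String.ofList ans

-- ===== PORT B =====
def smallestPos_alt (s : String) (n : Int) : String :=
  -- return ''.join(sorted(s[i] for i in range(n)))
  String.ofList (PySem.List.sorted
    ((PySem.List.pyRange 0 n 1).map (fun i => PySem.List.pyGetD s.toList i ' '))
    (fun c => c) false)

-- ===== PRECONDITION & SPEC =====
-- Pre_ excludes exactly the inputs where A raises IndexError: n > len(s), or a scanned character
-- whose code is outside 38..57 (then ord(c)-48 is outside the wrap range [-10,10) of the 10-slot table).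
def pvScanOk (c : Char) : Bool := 38 ≤ c.toNat && c.toNat ≤ 57
def Pre_smallestPos (s : String) (n : Int) : Prop :=
  n ≤ s.toList.length ∧ (s.toList.take n.toNat).all pvScanOk = true
instance (s : String) (n : Int) : Decidable (Pre_smallestPos s n) := by
  unfold Pre_smallestPos; infer_instance
def pvWitness_smallestPos : String × Int := ("3231190", 7)

-- On inputs whose first n characters include a non-digit with code 38..47 ('&'..'/'), A's negative
-- index ord(c)-48 wraps around the 10-slot table and A returns a spurious digit (e.g. '9' for '/'),
-- while B returns the characters themselves sorted, which is the intended result.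
def D_smallestPos (s : String) (n : Int) : Prop :=
  (s.toList.take n.toNat).any (fun c => decide (c.toNat < 48)) = true
instance (s : String) (n : Int) : Decidable (D_smallestPos s n) := by
  unfold D_smallestPos; infer_instance

def Spec_smallestPos (s : String) (n : Int) (out : String) : Prop :=
  ¬ D_smallestPos s n → out = smallestPos_alt s n
instance (s : String) (n : Int) (out : String) : Decidable (Spec_smallestPos s n out) := by
  unfold Spec_smallestPos; infer_instance

def pvDiffWitness_smallestPos : String × Int := ("/", 1)
def pvDiffWitnessOut_smallestPos : String × String := ("9", "/")

-- ===== CLAIM (what is proved, stated in full; the proofs are below) =====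
def Claim_unchanged_smallestPos : Prop := ∀ (s : String) (n : Int),
  Dom_smallestPos s n → Pre_smallestPos s n → Spec_smallestPos s n (smallestPos s n)
def Claim_changed_smallestPos : Prop :=
  Dom_smallestPos (pvDiffWitness_smallestPos.1) (pvDiffWitness_smallestPos.2) ∧
  Pre_smallestPos (pvDiffWitness_smallestPos.1) (pvDiffWitness_smallestPos.2) ∧
  D_smallestPos (pvDiffWitness_smallestPos.1) (pvDiffWitness_smallestPos.2) ∧
  smallestPos (pvDiffWitness_smallestPos.1) (pvDiffWitness_smallestPos.2) = pvDiffWitnessOut_smallestPos.1 ∧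
  smallestPos_alt (pvDiffWitness_smallestPos.1) (pvDiffWitness_smallestPos.2) = pvDiffWitnessOut_smallestPos.2 ∧
  pvDiffWitnessOut_smallestPos.1 ≠ pvDiffWitnessOut_smallestPos.2
def Claim_exact_smallestPos : Prop := ∀ (s : String) (n : Int),
  Dom_smallestPos s n → Pre_smallestPos s n → D_smallestPos s n →
  smallestPos s n ≠ smallestPos_alt s n
-- ===== LEMMAS AND PROOFS =====

def pvDigits : List Char := ['0','1','2','3','4','5','6','7','8','9']
def pvCounts (l : List Char) : List Int := pvDigits.map (fun d => (l.count d : Int))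
def pvBuild (l : List Char) : List Char := pvDigits.flatMap (fun d => List.replicate (l.count d) d)

lemma pv_char_eq {a b : Char} (h : a.toNat = b.toNat) : a = b :=
  Char.ext (UInt32.toNat_inj.mp h)

lemma pv_extract (cs : List Char) (n : Int) (hn : n ≤ cs.length) :
    (PySem.List.pyRange 0 n 1).map (fun i => PySem.List.pyGetD cs i ' ') = cs.take n.toNat := by
  rw [PySem.List.pyRange_one]
  rw [List.map_map]
  apply List.ext_getElem
  · simp; omega
  · intro i h1 h2
    simp only [List.getElem_map, List.getElem_range, Function.comp_apply, List.getElem_take]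
    have hi : i < cs.length := by simp at h2; omega
    rw [show ((0:Int) + (i:Int)) = (i:Int) by ring]
    rw [PySem.List.pyGetD_natCast]
    exact List.getD_eq_getElem _ _ hi

lemma pv_counts_len (l : List Char) : (pvCounts l).length = 10 := by
  simp [pvCounts, pvDigits]

lemma pv_digits_toNat (j : Nat) (h : j < 10) :
    (pvDigits[j]'(by simp [pvDigits]; omega)).toNat = 48 + j := by
  interval_cases j <;> rfl

lemma pv_count_step (m : List Char) (c : Char) (hc : 48 ≤ c.toNat ∧ c.toNat ≤ 57) :
    PySem.List.pySetD (pvCounts m) (((c.toNat : Int)) - 48)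
      (PySem.List.pyGetD (pvCounts m) (((c.toNat : Int)) - 48) 0 + 1) = pvCounts (m ++ [c]) := by
  have hcast : ((c.toNat : Int)) - 48 = ((c.toNat - 48 : Nat) : Int) := by omega
  rw [hcast, PySem.List.pySetD_natCast, PySem.List.pyGetD_natCast]
  have hgd : (pvCounts m).getD (c.toNat - 48) 0
      = ((m.count (pvDigits[c.toNat - 48]'(by simp [pvDigits]; omega)) : Nat) : Int) := by
    rw [List.getD_eq_getElem _ _ (by rw [pv_counts_len]; omega)]
    simp [pvCounts]
  rw [hgd]
  apply List.ext_getElem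
  · simp [pvCounts, pvDigits]
  · intro j hj1 hj2
    have hj10 : j < 10 := by have := pv_counts_len (m ++ [c]); omega
    rw [List.getElem_set]
    have hgetm : ∀ (l : List Char) (hx : j < (pvCounts l).length),
        (pvCounts l)[j]'hx = ((l.count (pvDigits[j]'(by simp [pvDigits]; omega)) : Nat) : Int) := by
      intro l hx
      simp [pvCounts]
    rw [hgetm (m ++ [c]) (by rw [pv_counts_len]; omega)]
    by_cases he : c.toNat - 48 = j
    · rw [if_pos he]
      have hdc : pvDigits[j]'(by simp [pvDigits]; omega) = c := by
        apply pv_char_eq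
        rw [pv_digits_toNat j hj10]
        omega
      have hd48 : c.toNat - 48 = j := he
      rw [hdc, List.count_append]
      have h1 : List.count c [c] = 1 := by simp
      rw [h1]
      rw [show pvDigits[c.toNat - 48]'(by simp [pvDigits]; omega)
            = pvDigits[j]'(by simp [pvDigits]; omega) by congr 1]
      rw [hdc]
      push_cast
      ring
    · rw [if_neg he]
      rw [hgetm m (by rw [pv_counts_len]; omega)]
      have hne : pvDigits[j]'(by simp [pvDigits]; omega) ≠ c := by
        intro hcc
        apply he
        have h1 := pv_digits_toNat j hj10
        rw [hcc] at h1
        omega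
      have h0 : List.count (pvDigits[j]'(by simp [pvDigits]; omega)) [c] = 0 :=
        List.count_eq_zero.mpr (by simpa using hne)
      rw [List.count_append, h0]
      simp

lemma pv_count_fold (l : List Char) (h : ∀ c ∈ l, 48 ≤ c.toNat ∧ c.toNat ≤ 57) :
    ∀ m : List Char,
    l.foldl (fun arr c => PySem.List.pySetD arr (((c.toNat : Int)) - 48)
        (PySem.List.pyGetD arr (((c.toNat : Int)) - 48) 0 + 1)) (pvCounts m) = pvCounts (m ++ l) := by
  induction l with
  | nil => intro m; simp
  | cons c l ih =>
    intro m
    have hc := h c (by simp)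
    simp only [List.foldl_cons]
    rw [pv_count_step m c hc]
    rw [ih (fun c hm => h c (by simp [hm])) (m ++ [c])]
    simp

lemma pv_foldl_append_const (L : List Int) (d : List Char) :
    ∀ a0 : List Char, L.foldl (fun a _ => a ++ d) a0 = a0 ++ (List.replicate L.length d).flatten := by
  induction L with
  | nil => intro a0; simp
  | cons x L ih => intro a0; simp [List.foldl_cons, ih, List.replicate_succ]

lemma pv_flatten_replicate (k : Nat) (c : Char) :
    (List.replicate k [c]).flatten = List.replicate k c := by
  induction k with
  | zero => simp
  | succ k ih => simp [List.replicate_succ, ih]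

lemma pv_inner_fold (k : Nat) (i : Int) (a0 : List Char) :
    (PySem.List.pyRange 0 (k : Int) 1).foldl (fun a _ => a ++ PySem.Int.toChars i) a0
      = a0 ++ (List.replicate k (PySem.Int.toChars i)).flatten := by
  rw [pv_foldl_append_const, PySem.List.length_pyRange_one]
  simp

lemma pv_build_fold (l : List Char) :
    (PySem.List.pyRange 0 10 1).foldl (fun ans i =>
      (PySem.List.pyRange 0 (PySem.List.pyGetD (pvCounts l) i 0) 1).foldl
        (fun ans _ => ans ++ PySem.Int.toChars i) ans) ([] : List Char) = pvBuild l := by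
  have h10 : PySem.List.pyRange 0 10 1 = [0,1,2,3,4,5,6,7,8,9] := by decide
  rw [h10]
  simp only [List.foldl_cons, List.foldl_nil]
  rw [show PySem.List.pyGetD (pvCounts l) 0 0 = ((l.count '0' : Nat) : Int) from rfl,
      show PySem.List.pyGetD (pvCounts l) 1 0 = ((l.count '1' : Nat) : Int) from rfl,
      show PySem.List.pyGetD (pvCounts l) 2 0 = ((l.count '2' : Nat) : Int) from rfl,
      show PySem.List.pyGetD (pvCounts l) 3 0 = ((l.count '3' : Nat) : Int) from rfl,
      show PySem.List.pyGetD (pvCounts l) 4 0 = ((l.count '4' : Nat) : Int) from rfl,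
      show PySem.List.pyGetD (pvCounts l) 5 0 = ((l.count '5' : Nat) : Int) from rfl,
      show PySem.List.pyGetD (pvCounts l) 6 0 = ((l.count '6' : Nat) : Int) from rfl,
      show PySem.List.pyGetD (pvCounts l) 7 0 = ((l.count '7' : Nat) : Int) from rfl,
      show PySem.List.pyGetD (pvCounts l) 8 0 = ((l.count '8' : Nat) : Int) from rfl,
      show PySem.List.pyGetD (pvCounts l) 9 0 = ((l.count '9' : Nat) : Int) from rfl]
  simp only [pv_inner_fold]
  simp only [show PySem.Int.toChars 0 = ['0'] from rfl, show PySem.Int.toChars 1 = ['1'] from rfl,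
    show PySem.Int.toChars 2 = ['2'] from rfl, show PySem.Int.toChars 3 = ['3'] from rfl,
    show PySem.Int.toChars 4 = ['4'] from rfl, show PySem.Int.toChars 5 = ['5'] from rfl,
    show PySem.Int.toChars 6 = ['6'] from rfl, show PySem.Int.toChars 7 = ['7'] from rfl,
    show PySem.Int.toChars 8 = ['8'] from rfl, show PySem.Int.toChars 9 = ['9'] from rfl]
  simp only [pv_flatten_replicate]
  simp [pvBuild, pvDigits, List.flatMap_cons, List.flatMap_nil, List.append_assoc]

lemma pv_build_perm (l : List Char) (h : ∀ c ∈ l, 48 ≤ c.toNat ∧ c.toNat ≤ 57) :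
    (pvBuild l).Perm l := by
  rw [List.perm_iff_count]
  intro a
  by_cases ha : 48 ≤ a.toNat ∧ a.toNat ≤ 57
  · obtain ⟨h1, h2⟩ := ha
    have h48 : a.toNat = 48 ∨ a.toNat = 49 ∨ a.toNat = 50 ∨ a.toNat = 51 ∨ a.toNat = 52 ∨
        a.toNat = 53 ∨ a.toNat = 54 ∨ a.toNat = 55 ∨ a.toNat = 56 ∨ a.toNat = 57 := by omega
    rcases h48 with h|h|h|h|h|h|h|h|h|h
    · have hx : a = '0' := pv_char_eq (by rw [h]; rfl)
      subst hx
      simp [pvBuild, pvDigits, List.count_append, List.count_replicate]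
    · have hx : a = '1' := pv_char_eq (by rw [h]; rfl)
      subst hx
      simp [pvBuild, pvDigits, List.count_append, List.count_replicate]
    · have hx : a = '2' := pv_char_eq (by rw [h]; rfl)
      subst hx
      simp [pvBuild, pvDigits, List.count_append, List.count_replicate]
    · have hx : a = '3' := pv_char_eq (by rw [h]; rfl)
      subst hx
      simp [pvBuild, pvDigits, List.count_append, List.count_replicate]
    · have hx : a = '4' := pv_char_eq (by rw [h]; rfl)
      subst hx
      simp [pvBuild, pvDigits, List.count_append, List.count_replicate]
    · have hx : a = '5' := pv_char_eq (by rw [h]; rfl)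
      subst hx
      simp [pvBuild, pvDigits, List.count_append, List.count_replicate]
    · have hx : a = '6' := pv_char_eq (by rw [h]; rfl)
      subst hx
      simp [pvBuild, pvDigits, List.count_append, List.count_replicate]
    · have hx : a = '7' := pv_char_eq (by rw [h]; rfl)
      subst hx
      simp [pvBuild, pvDigits, List.count_append, List.count_replicate]
    · have hx : a = '8' := pv_char_eq (by rw [h]; rfl)
      subst hx
      simp [pvBuild, pvDigits, List.count_append, List.count_replicate]
    · have hx : a = '9' := pv_char_eq (by rw [h]; rfl)
      subst hx
      simp [pvBuild, pvDigits, List.count_append, List.count_replicate]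
  · have hnotin : a ∉ l := fun hmem => ha (h a hmem)
    have h2 : l.count a = 0 := List.count_eq_zero.mpr hnotin
    have h3 : a ∉ pvBuild l := by
      simp only [pvBuild, pvDigits, List.mem_flatMap, List.mem_replicate]
      rintro ⟨d, hd, -, rfl⟩
      fin_cases hd <;> simp_all
    rw [List.count_eq_zero.mpr h3, h2]

lemma pv_blocks_pairwise (ds : List Char) (f : Char → Nat) (hds : ds.Pairwise (· ≤ ·)) :
    (ds.flatMap (fun d => List.replicate (f d) d)).Pairwise (· ≤ ·) := by
  induction ds with
  | nil => simp
  | cons d ds ih =>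
    rw [List.flatMap_cons, List.pairwise_append]
    refine ⟨?_, ih (List.Pairwise.of_cons hds), ?_⟩
    · rw [List.pairwise_replicate]
      right; exact le_refl d
    · intro a haa b hbb
      rw [List.eq_of_mem_replicate haa]
      obtain ⟨e, he, hbe⟩ := List.mem_flatMap.mp hbb
      obtain ⟨-, rfl⟩ := List.mem_replicate.mp hbe
      exact (List.pairwise_cons.mp hds).1 _ he

lemma pv_build_pairwise (l : List Char) : (pvBuild l).Pairwise (· ≤ ·) := by
  exact pv_blocks_pairwise pvDigits l.count (by decide)

lemma pv_build_eq_sorted (l : List Char) (h : ∀ c ∈ l, 48 ≤ c.toNat ∧ c.toNat ≤ 57) :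
    pvBuild l = PySem.List.sorted l (fun c => c) false := by
  apply List.eq_of_perm_of_sorted
  · intro a b _ _ h1 h2; exact le_antisymm h1 h2
  · exact pv_build_pairwise l
  · exact PySem.List.sorted_pairwise l (fun c => c)
  · exact (pv_build_perm l h).trans (PySem.List.sorted_perm l (fun c => c) false).symm

lemma pv_mem_buildphase (arr : List Int) (x : Char) :
    ∀ (L : List Int) (a0 : List Char),
    x ∈ L.foldl (fun ans i =>
      (PySem.List.pyRange 0 (PySem.List.pyGetD arr i 0) 1).foldl
        (fun ans _ => ans ++ PySem.Int.toChars i) ans) a0 →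
    x ∈ a0 ∨ ∃ i ∈ L, x ∈ PySem.Int.toChars i := by
  intro L
  induction L with
  | nil => intro a0 h; exact Or.inl h
  | cons i L ih =>
    intro a0 h
    rw [List.foldl_cons] at h
    rcases ih _ h with h1 | ⟨j, hj, hx⟩
    · simp only [pv_foldl_append_const, List.mem_append, List.mem_flatten] at h1
      rcases h1 with h1 | h1
      · exact Or.inl h1
      · obtain ⟨ys, hys, hxy⟩ := h1
        rw [List.eq_of_mem_replicate hys] at hxy
        exact Or.inr ⟨i, by simp, hxy⟩
    · exact Or.inr ⟨j, by simp [hj], hx⟩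

-- ===== VERDICT =====
theorem smallestPos_spec : Claim_unchanged_smallestPos := by
  intro s n _ hpre hD
  simp only [smallestPos, smallestPos_alt]
  by_cases hn : n ≤ 0
  · simp only [PySem.List.pyRange_one_eq_nil hn, List.foldl_nil, List.map_nil]
    decide
  · push_neg at hn
    have hall : ∀ c ∈ s.toList.take n.toNat, 48 ≤ c.toNat ∧ c.toNat ≤ 57 := by
      intro c hc
      have h1 : pvScanOk c = true := List.all_eq_true.mp hpre.2 c hc
      simp only [pvScanOk, Bool.and_eq_true, decide_eq_true_eq] at h1
      constructor
      · by_contra hlt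
        exact hD (List.any_eq_true.mpr ⟨c, hc, by simp; omega⟩)
      · exact h1.2
    have hmap := pv_extract s.toList n hpre.1
    have hcf : (PySem.List.pyRange 0 n 1).foldl (fun arr i =>
        PySem.List.pySetD arr (((PySem.List.pyGetD s.toList i ' ').toNat : Int) - 48)
          (PySem.List.pyGetD arr (((PySem.List.pyGetD s.toList i ' ').toNat : Int) - 48) 0 + 1))
        (List.replicate 10 0) = pvCounts (s.toList.take n.toNat) := by
      calc (PySem.List.pyRange 0 n 1).foldl (fun arr i =>
            PySem.List.pySetD arr (((PySem.List.pyGetD s.toList i ' ').toNat : Int) - 48)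
              (PySem.List.pyGetD arr (((PySem.List.pyGetD s.toList i ' ').toNat : Int) - 48) 0 + 1))
            (List.replicate 10 0)
          = ((PySem.List.pyRange 0 n 1).map (fun i => PySem.List.pyGetD s.toList i ' ')).foldl
              (fun arr c => PySem.List.pySetD arr (((c.toNat : Int)) - 48)
                (PySem.List.pyGetD arr (((c.toNat : Int)) - 48) 0 + 1)) (pvCounts []) := by
            rw [List.foldl_map]
            rfl
        _ = (s.toList.take n.toNat).foldl
              (fun arr c => PySem.List.pySetD arr (((c.toNat : Int)) - 48)
                (PySem.List.pyGetD arr (((c.toNat : Int)) - 48) 0 + 1)) (pvCounts []) := by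
            rw [hmap]
        _ = pvCounts ([] ++ s.toList.take n.toNat) := pv_count_fold _ hall []
        _ = pvCounts (s.toList.take n.toNat) := by simp
    rw [hcf, pv_build_fold, hmap, pv_build_eq_sorted _ hall]

set_option maxRecDepth 4000 in
theorem smallestPos_changed : Claim_changed_smallestPos := by
  unfold Claim_changed_smallestPos
  refine ⟨by decide, by decide, by decide, by decide, by decide, by decide⟩

set_option maxRecDepth 4000 in
theorem smallestPos_tight : Claim_exact_smallestPos := by
  intro s n _ hpre hD heq
  obtain ⟨c, hc, hlt'⟩ := List.any_eq_true.mp hD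
  have hlt : c.toNat < 48 := by simpa using hlt'
  have hcB : c ∈ (smallestPos_alt s n).toList := by
    simp only [smallestPos_alt, String.toList_ofList]
    rw [PySem.List.mem_sorted]
    rw [pv_extract s.toList n hpre.1]
    exact hc
  have hcA : c ∈ (smallestPos s n).toList := by rw [heq]; exact hcB
  simp only [smallestPos, String.toList_ofList] at hcA
  rcases pv_mem_buildphase _ c _ _ hcA with h | ⟨i, hi, hx⟩
  · simp at h
  · have h10 : PySem.List.pyRange 0 10 1 = [0,1,2,3,4,5,6,7,8,9] := by decide
    rw [h10] at hi
    fin_cases hi <;>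
      simp only [show PySem.Int.toChars 0 = ['0'] from rfl, show PySem.Int.toChars 1 = ['1'] from rfl,
        show PySem.Int.toChars 2 = ['2'] from rfl, show PySem.Int.toChars 3 = ['3'] from rfl,
        show PySem.Int.toChars 4 = ['4'] from rfl, show PySem.Int.toChars 5 = ['5'] from rfl,
        show PySem.Int.toChars 6 = ['6'] from rfl, show PySem.Int.toChars 7 = ['7'] from rfl,
        show PySem.Int.toChars 8 = ['8'] from rfl, show PySem.Int.toChars 9 = ['9'] from rfl,
        List.mem_singleton] at hx <;>
      subst hx <;> revert hlt <;> decide
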